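-- pv_equiv track=rewrite | github.com/novajorge/PadronLeganesCita | backend/notifications.py | _generar_mensaje_citas
-- ===== SOURCE A (Python) =====
-- def _generar_mensaje_citas(citas: list) -> str:
--     """Genera el mensaje de notificación de citas"""
--     # Agrupar citas por fecha
--     citas_por_fecha = {}
--     for cita in citas:
--         fecha = cita.get("fecha", "Sin fecha")
--         hora = cita.get("hora", "")
--         unidad = cita.get("unidad", "Padrón")
--
--         if fecha not in citas_por_fecha:
--             citas_por_fecha[fecha] = []
--         citas_por_fecha[fecha].append(f"{hora} ({unidad})")
--
--     mensaje = """
--     <html>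
--     <body>
--         <h2 style="color: #1e40af;">🚨 ¡Citas Disponibles!</h2>
--         <p>Se han detectado citas disponibles para <b>Padrón</b> en la Casa del Reloj de Leganés.</p>
--     """
--
--     if citas_por_fecha:
--         mensaje += "<h3>Citas disponibles:</h3><ul>"
--         for fecha, horas in sorted(citas_por_fecha.items()):
--             mensaje += f"<li><b>{fecha}</b>: {', '.join(horas)}</li>"
--         mensaje += "</ul>"
--
--     # Limitar a las primeras 20 citas para no exceder límites
--     total_citas = len(citas)
--     if total_citas > 20:
--         mensaje += f"<p><i>... y {total_citas - 20} citas más.</i></p>"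
--
--     mensaje += """
--         <p>Accede ahora: <a href="https://intraweb.leganes.org/CitaPrevia/">Cita Previa Leganés</a></p>
--         <hr>
--         <p style="color: #666; font-size: 12px;">
--             Servicio de monitorización de citas - No respondas a este mensaje.
--         </p>
--     </body>
--     </html>
--     """
--     return mensaje
-- ===== SOURCE B (Python) =====
-- def _generar_mensaje_citas(citas: list) -> str:
--     """Genera el mensaje de notificación de citas"""
--     # Distinct fechas, sorted; one filter pass per fecha instead of dict accumulation.
--     fechas = sorted({c.get("fecha", "Sin fecha") for c in citas})
--
--     partes = ["""
--     <html>
--     <body>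
--         <h2 style="color: #1e40af;">🚨 ¡Citas Disponibles!</h2>
--         <p>Se han detectado citas disponibles para <b>Padrón</b> en la Casa del Reloj de Leganés.</p>
--     """]
--
--     if citas:
--         partes.append("<h3>Citas disponibles:</h3><ul>")
--         for fecha in fechas:
--             horas = ", ".join(
--                 f"{c.get('hora', '')} ({c.get('unidad', 'Padrón')})"
--                 for c in citas
--                 if c.get("fecha", "Sin fecha") == fecha
--             )
--             partes.append(f"<li><b>{fecha}</b>: {horas}</li>")
--         partes.append("</ul>")
--
--     if len(citas) > 20:
--         partes.append(f"<p><i>... y {len(citas) - 20} citas más.</i></p>")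
--
--     partes.append("""
--         <p>Accede ahora: <a href="https://intraweb.leganes.org/CitaPrevia/">Cita Previa Leganés</a></p>
--         <hr>
--         <p style="color: #666; font-size: 12px;">
--             Servicio de monitorización de citas - No respondas a este mensaje.
--         </p>
--     </body>
--     </html>
--     """)
--     return "".join(partes)
-- ===== Notes on version B (the rewrite author's own statement) =====
-- stated objective: alternative
-- what changed: Replaces the dict-accumulation grouping (membership test + per-key append, then sorting the items) by computing the sorted distinct fechas once and doing one filter pass per fecha, and builds the message as a list of parts joined once instead of repeated string concatenation.
import Mathlib
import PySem

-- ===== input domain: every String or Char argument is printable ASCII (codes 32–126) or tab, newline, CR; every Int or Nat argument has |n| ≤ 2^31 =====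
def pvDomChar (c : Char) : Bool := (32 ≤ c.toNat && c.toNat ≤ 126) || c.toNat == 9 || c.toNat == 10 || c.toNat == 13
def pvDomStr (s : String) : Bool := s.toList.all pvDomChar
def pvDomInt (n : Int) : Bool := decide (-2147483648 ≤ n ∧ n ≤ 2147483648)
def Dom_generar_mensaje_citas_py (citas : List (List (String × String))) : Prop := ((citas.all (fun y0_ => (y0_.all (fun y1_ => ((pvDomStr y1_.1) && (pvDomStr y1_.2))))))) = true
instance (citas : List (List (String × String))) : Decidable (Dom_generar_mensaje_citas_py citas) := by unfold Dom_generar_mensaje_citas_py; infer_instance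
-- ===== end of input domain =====

-- B replaces A's dict-accumulation grouping by sorted-distinct-fechas + one filter pass per fecha,
-- and builds the message as a list of parts joined once instead of repeated string concatenation (objective: alternative).

-- shared transliterations of the Python `.get` accesses and the f-string "{hora} ({unidad})"
def pvFecha (c : List (String × String)) : String := (PySem.Dict.mk c).getD "fecha" "Sin fecha"
def pvEntry (c : List (String × String)) : String :=
  (PySem.Dict.mk c).getD "hora" "" ++ " (" ++ (PySem.Dict.mk c).getD "unidad" "Padrón" ++ ")"

def pvHeader : String := "\n    <html>\n    <body>\n        <h2 style=\"color: #1e40af;\">🚨 ¡Citas Disponibles!</h2>\n        <p>Se han detectado citas disponibles para <b>Padrón</b> en la Casa del Reloj de Leganés.</p>\n    "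
def pvFooter : String := "\n        <p>Accede ahora: <a href=\"https://intraweb.leganes.org/CitaPrevia/\">Cita Previa Leganés</a></p>\n        <hr>\n        <p style=\"color: #666; font-size: 12px;\">\n            Servicio de monitorización de citas - No respondas a este mensaje.\n        </p>\n    </body>\n    </html>\n    "

-- ===== PORT A =====
def generar_mensaje_citas_py (citas : List (List (String × String))) : String :=
  let citas_por_fecha : PySem.Dict String (List String) :=
    citas.foldl (fun d cita =>
      let fecha := pvFecha cita
      -- if fecha not in citas_por_fecha: citas_por_fecha[fecha] = []
      let d := if d.contains fecha then d else d.insert fecha ([] : List String)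
      -- citas_por_fecha[fecha].append(f"{hora} ({unidad})")
      d.modify fecha [] (fun xs => xs ++ [pvEntry cita])) PySem.Dict.empty
  let mensaje := pvHeader
  let mensaje :=
    if citas_por_fecha.items ≠ [] then
      -- sorted(citas_por_fecha.items()): dict keys are distinct, so Python's tuple comparison is
      -- decided by the first component and the stable sort by `p.1` is exact
      ((PySem.List.sorted citas_por_fecha.items (fun p => p.1)).foldl
        (fun m p => m ++ "<li><b>" ++ p.1 ++ "</b>: " ++ PySem.Str.join ", " p.2 ++ "</li>")
        (mensaje ++ "<h3>Citas disponibles:</h3><ul>")) ++ "</ul>"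
    else mensaje
  let total_citas : Int := citas.length
  let mensaje :=
    if total_citas > 20 then
      mensaje ++ "<p><i>... y " ++ PySem.Int.toStr (total_citas - 20) ++ " citas más.</i></p>"
    else mensaje
  mensaje ++ pvFooter

-- ===== PORT B =====
def generar_mensaje_citas_py_alt (citas : List (List (String × String))) : String :=
  let fechas := PySem.List.sorted (PySem.Set.ofList (citas.map pvFecha)) (fun x => x)
  let partes : List String := [pvHeader]
  let partes :=
    if !citas.isEmpty then
      (fechas.foldl (fun ps fecha =>
          ps ++ ["<li><b>" ++ fecha ++ "</b>: " ++
                 PySem.Str.join ", " ((citas.filter (fun c => pvFecha c == fecha)).map pvEntry) ++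
                 "</li>"])
        (partes ++ ["<h3>Citas disponibles:</h3><ul>"])) ++ ["</ul>"]
    else partes
  let partes :=
    if (citas.length : Int) > 20 then
      partes ++ ["<p><i>... y " ++ PySem.Int.toStr ((citas.length : Int) - 20) ++ " citas más.</i></p>"]
    else partes
  PySem.Str.join "" (partes ++ [pvFooter])

-- ===== PRECONDITION & SPEC =====
def Spec_generar_mensaje_citas_py (citas : List (List (String × String))) (out : String) : Prop := out = generar_mensaje_citas_py_alt citas
instance (citas : List (List (String × String))) (out : String) : Decidable (Spec_generar_mensaje_citas_py citas out) := by unfold Spec_generar_mensaje_citas_py; infer_instance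

-- ===== CLAIM (what is proved, stated in full; the proofs are below) =====
def Claim_equal_generar_mensaje_citas_py : Prop := ∀ (citas : List (List (String × String))), Dom_generar_mensaje_citas_py citas → Spec_generar_mensaje_citas_py citas (generar_mensaje_citas_py citas)

-- ===== LEMMAS AND PROOFS =====

-- per-fecha list of "hora (unidad)" strings, in citas order
def pvHoras (citas : List (List (String × String))) (f : String) : List String :=
  (citas.filter (fun c => pvFecha c == f)).map pvEntry

-- the <li> line for one fecha
def pvLi (citas : List (List (String × String))) (f : String) : String :=
  "<li><b>" ++ f ++ "</b>: " ++ PySem.Str.join ", " (pvHoras citas f) ++ "</li>"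

-- A's branch-then-append loop body equals a plain modify
lemma pv_step_eq (d : PySem.Dict String (List String)) (cita : List (String × String)) :
    (let fecha := pvFecha cita
     let d := if d.contains fecha then d else d.insert fecha ([] : List String)
     d.modify fecha [] (fun xs => xs ++ [pvEntry cita]))
    = d.modify (pvFecha cita) [] (fun xs => xs ++ [pvEntry cita]) := by
  by_cases h : d.contains (pvFecha cita)
  · simp [h]
  · simp only [Bool.not_eq_true] at h
    simp only [h, if_neg Bool.false_ne_true, PySem.Dict.modify,
      PySem.Dict.getD_insert_self, PySem.Dict.insert_insert_self]
    have hg : d.getD (pvFecha cita) [] = [] := by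
      simp [PySem.Dict.getD, (PySem.Dict.get?_eq_none_iff_contains d _).2 h]
    rw [hg]

def pvDict (citas : List (List (String × String))) : PySem.Dict String (List String) :=
  citas.foldl (fun d c => d.modify (pvFecha c) [] (fun xs => xs ++ [pvEntry c])) PySem.Dict.empty

lemma pv_keys (citas : List (List (String × String))) :
    (pvDict citas).keys = PySem.Set.ofList (citas.map pvFecha) := by
  unfold pvDict
  rw [PySem.Dict.keys_foldl_modify_key citas pvFecha [] (fun _ c xs => xs ++ [pvEntry c])]
  simp [PySem.Dict.keys_empty, PySem.Set.update, PySem.Set.ofList]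

lemma pv_nodup_keys (citas : List (List (String × String))) : (pvDict citas).keys.Nodup := by
  unfold pvDict
  exact PySem.Dict.nodup_keys_foldl_modify_key citas pvFecha [] (fun _ c xs => xs ++ [pvEntry c])
    PySem.Dict.empty (by simp [PySem.Dict.keys_empty])

lemma pv_getD (citas : List (List (String × String))) (f : String) :
    (pvDict citas).getD f [] = pvHoras citas f := by
  unfold pvDict
  have h : citas.foldl (fun d c => d.modify (pvFecha c) [] (fun xs => xs ++ [pvEntry c])) PySem.Dict.empty
      = (citas.map (fun c => (pvFecha c, pvEntry c))).foldl
          (fun d p => d.modify p.1 [] (fun xs => xs ++ [p.2])) PySem.Dict.empty := by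
    rw [List.foldl_map]
  rw [h, PySem.Dict.getD_foldl_modify_append]
  simp [pvHoras, List.filter_map, List.map_map, Function.comp_def]

lemma pv_items (citas : List (List (String × String))) :
    (pvDict citas).items
      = (PySem.Set.ofList (citas.map pvFecha)).map (fun k => (k, pvHoras citas k)) := by
  rw [PySem.Dict.items_eq_map_keys (pvDict citas) (pv_nodup_keys citas) []]
  rw [pv_keys]
  exact List.map_congr_left (fun k _ => by rw [pv_getD])

-- sorting the items by first component = mapping over the sorted distinct fechas
lemma pv_sorted_items (citas : List (List (String × String))) :
    PySem.List.sorted (pvDict citas).items (fun p => p.1)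
      = (PySem.List.sorted (PySem.Set.ofList (citas.map pvFecha)) (fun x => x)).map
          (fun k => (k, pvHoras citas k)) := by
  rw [pv_items]
  apply PySem.List.sorted_eq_of_perm_of_pairwise_lt
  · exact (PySem.List.sorted_perm _ _ _).map _
  · rw [List.pairwise_map]
    have hle := PySem.List.sorted_pairwise (PySem.Set.ofList (citas.map pvFecha)) (fun x => x)
    have hnd : (PySem.List.sorted (PySem.Set.ofList (citas.map pvFecha)) (fun x => x)).Nodup :=
      (PySem.List.sorted_perm _ _ _).nodup_iff.mpr (PySem.Set.nodup_ofList _)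
    exact (hle.and hnd).imp (fun h => lt_of_le_of_ne h.1 h.2)

-- A's string-appending foldl over the sorted fechas, read as character lists
lemma pv_foldl_strA (citas : List (List (String × String))) (l : List String) (m0 : String) :
    (l.foldl (fun m k => m ++ "<li><b>" ++ k ++ "</b>: " ++
        PySem.Str.join ", " (pvHoras citas k) ++ "</li>") m0).toList
      = m0.toList ++ (l.map (fun k => (pvLi citas k).toList)).flatten := by
  induction l generalizing m0 with
  | nil => simp
  | cons x t ih =>
    rw [List.foldl_cons, ih]
    simp [pvLi, pvHoras, String.toList_append, List.append_assoc]

-- ''.join flattens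
lemma pv_chars_join_nil (ps : List (List Char)) : PySem.Chars.join [] ps = ps.flatten := by
  induction ps with
  | nil => simp [PySem.Chars.join_nil]
  | cons p rest ih =>
    cases rest with
    | nil => simp [PySem.Chars.join_singleton]
    | cons q r => rw [PySem.Chars.join_cons_cons]; simp_all

lemma pv_ofList_nil_iff (l : List String) : PySem.Set.ofList l = [] ↔ l = [] := by
  constructor
  · intro h
    cases l with
    | nil => rfl
    | cons x t =>
      exfalso
      have hx := (PySem.Set.mem_ofList (x :: t) x).2 (by simp)
      simp [h] at hx
  · intro h; subst h; rfl

-- ===== VERDICT (by name: the statement is the Claim_ definition above) =====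
theorem generar_mensaje_citas_py_spec : Claim_equal_generar_mensaje_citas_py := by
  intro citas _
  unfold Spec_generar_mensaje_citas_py generar_mensaje_citas_py generar_mensaje_citas_py_alt
  have hstep : citas.foldl (fun d cita =>
      let fecha := pvFecha cita
      let d := if d.contains fecha then d else d.insert fecha ([] : List String)
      d.modify fecha [] (fun xs => xs ++ [pvEntry cita])) PySem.Dict.empty = pvDict citas := by
    unfold pvDict
    exact PySem.List.foldl_congr_mem citas _ _ PySem.Dict.empty (fun d c _ => pv_step_eq d c)
  simp only [hstep]
  apply String.ext
  by_cases hne : citas = []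
  · subst hne
    simp [pvDict, PySem.Dict.empty, PySem.Str.toList_join, pv_chars_join_nil,
      String.toList_append]
  · have hag : (pvDict citas).items ≠ [] := by
      rw [pv_items]
      simp only [ne_eq, List.map_eq_nil_iff, pv_ofList_nil_iff, List.map_eq_nil_iff]
      exact hne
    have hne' : (!citas.isEmpty) = true := by simpa [List.isEmpty_iff] using hne
    rw [if_pos hag, if_pos hne', pv_sorted_items]
    simp only [List.foldl_map]
    rw [PySem.List.foldl_append_singleton_eq_map]
    have hA := pv_foldl_strA citas
      (PySem.List.sorted (PySem.Set.ofList (citas.map pvFecha)) (fun x => x))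
    by_cases h20 : (citas.length : Int) > 20 <;>
      simp only [h20, ite_true, ite_false, String.toList_append] <;>
      rw [hA] <;>
      simp [pvLi, pvHoras, PySem.Str.toList_join, pv_chars_join_nil,
        String.toList_append, List.map_map, Function.comp_def, List.append_assoc]
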